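-- pv_equiv track=rewrite | github.com/DevangK18/CAG | tests/evaluation_framework/evaluate.py | find_entity_in_text
-- ===== SOURCE A (Python) =====
-- def normalize_entity(entity: str) -> str:
--     """Normalize entity name for matching."""
--     return entity.lower().strip()
--
-- def find_entity_in_text(entity: str, text: str) -> bool:
--     """
--     Check if entity appears in text (fuzzy matching).
--     Handles common variations.
--     """
--     normalized_entity = normalize_entity(entity)
--     normalized_text = text.lower()
--
--     # Direct match
--     if normalized_entity in normalized_text:
--         return True
--
--     # IMPROVED: Extended variations
--     variations = {
--         "nhai": ["national highways authority", "highways authority of india"],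
--         "pmjay": [
--             "pradhan mantri jan arogya",
--             "ayushman bharat",
--             "jan arogya yojana",
--             "ab-pmjay",
--         ],
--         "cbdt": ["central board of direct taxes"],
--         "fci": ["food corporation of india", "food corporation"],
--         "cpse": [
--             "central public sector enterprise",
--             "public sector enterprise",
--             "cpses",
--         ],
--         "sebi": ["securities and exchange board"],
--         "frbm": ["fiscal responsibility", "budget management"],
--         "sha": ["state health agency", "state health agencies"],
--         "nha": ["national health authority"],
--         "tms": ["transaction management system"],
--         "cwc": ["central warehousing corporation"],
--         "swc": ["state warehousing corporation"],
--         "peg": ["private entrepreneurs guarantee", "guarantee scheme"],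
--         "cap": ["covered and plinth", "cover and plinth"],
--         "fsd": ["food storage depot"],
--         "itd": ["income tax department"],
--         "gst": ["goods and services tax"],
--         "cgst": ["central gst"],
--         "igst": ["integrated gst"],
--     }
--
--     # Check if entity is an abbreviation with known variations
--     if normalized_entity in variations:
--         for variation in variations[normalized_entity]:
--             if variation in normalized_text:
--                 return True
--
--     # Check if entity is a known full form
--     for abbr, full_forms in variations.items():
--         if normalized_entity in full_forms:
--             if abbr in normalized_text:
--                 return True
--
--     return False
-- ===== SOURCE B (Python) =====
-- _VARIATIONS = {
--     "nhai": ["national highways authority", "highways authority of india"],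
--     "pmjay": [
--         "pradhan mantri jan arogya",
--         "ayushman bharat",
--         "jan arogya yojana",
--         "ab-pmjay",
--     ],
--     "cbdt": ["central board of direct taxes"],
--     "fci": ["food corporation of india", "food corporation"],
--     "cpse": [
--         "central public sector enterprise",
--         "public sector enterprise",
--         "cpses",
--     ],
--     "sebi": ["securities and exchange board"],
--     "frbm": ["fiscal responsibility", "budget management"],
--     "sha": ["state health agency", "state health agencies"],
--     "nha": ["national health authority"],
--     "tms": ["transaction management system"],
--     "cwc": ["central warehousing corporation"],
--     "swc": ["state warehousing corporation"],
--     "peg": ["private entrepreneurs guarantee", "guarantee scheme"],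
--     "cap": ["covered and plinth", "cover and plinth"],
--     "fsd": ["food storage depot"],
--     "itd": ["income tax department"],
--     "gst": ["goods and services tax"],
--     "cgst": ["central gst"],
--     "igst": ["integrated gst"],
-- }
--
-- # One directional reverse-lookup index built once: each abbreviation maps to its
-- # full forms, and each full form maps to its abbreviation.
-- _LOOKUP = {}
-- for _abbr, _fulls in _VARIATIONS.items():
--     _LOOKUP[_abbr] = _LOOKUP.get(_abbr, []) + list(_fulls)
--     for _f in _fulls:
--         _LOOKUP[_f] = _LOOKUP.get(_f, []) + [_abbr]
--
--
-- def find_entity_in_text(entity: str, text: str) -> bool: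
--     e = entity.lower().strip()
--     t = text.lower()
--     return e in t or any(alt in t for alt in _LOOKUP.get(e, ()))
-- ===== Notes on version B (the rewrite author's own statement) =====
-- stated objective: simpler
-- what changed: Replaces A's two separate variation passes (abbreviation block plus a whole-dictionary scan over every (abbr, full_forms) group) by a single directional reverse-lookup index built once, so the function body is one lookup plus one any() over the mapped alternates.
import Mathlib
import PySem

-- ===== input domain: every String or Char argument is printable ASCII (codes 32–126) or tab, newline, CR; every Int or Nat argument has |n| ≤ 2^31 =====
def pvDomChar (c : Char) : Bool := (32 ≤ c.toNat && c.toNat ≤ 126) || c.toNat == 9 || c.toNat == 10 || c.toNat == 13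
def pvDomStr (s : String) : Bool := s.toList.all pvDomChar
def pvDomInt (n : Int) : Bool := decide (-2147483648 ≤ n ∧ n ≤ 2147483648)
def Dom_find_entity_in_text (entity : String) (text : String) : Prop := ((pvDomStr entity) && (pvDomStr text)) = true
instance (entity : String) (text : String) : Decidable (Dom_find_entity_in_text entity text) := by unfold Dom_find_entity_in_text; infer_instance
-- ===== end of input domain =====

set_option maxRecDepth 4096
set_option maxHeartbeats 2000000

-- B replaces A's two variation scans by one precomputed directional reverse-lookup index; objective: simpler.
-- ===== PORT A =====
def pvVariations : PySem.Dict String (List String) := PySem.Dict.mk [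
  ("nhai", ["national highways authority", "highways authority of india"]),
  ("pmjay", ["pradhan mantri jan arogya", "ayushman bharat", "jan arogya yojana", "ab-pmjay"]),
  ("cbdt", ["central board of direct taxes"]),
  ("fci", ["food corporation of india", "food corporation"]),
  ("cpse", ["central public sector enterprise", "public sector enterprise", "cpses"]),
  ("sebi", ["securities and exchange board"]),
  ("frbm", ["fiscal responsibility", "budget management"]),
  ("sha", ["state health agency", "state health agencies"]),
  ("nha", ["national health authority"]),
  ("tms", ["transaction management system"]),
  ("cwc", ["central warehousing corporation"]),
  ("swc", ["state warehousing corporation"]),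
  ("peg", ["private entrepreneurs guarantee", "guarantee scheme"]),
  ("cap", ["covered and plinth", "cover and plinth"]),
  ("fsd", ["food storage depot"]),
  ("itd", ["income tax department"]),
  ("gst", ["goods and services tax"]),
  ("cgst", ["central gst"]),
  ("igst", ["integrated gst"])]

def normalize_entity (entity : String) : String :=
  PySem.Str.strip (PySem.Str.lower entity)

def find_entity_in_text (entity : String) (text : String) : Bool :=
  let normalized_entity := normalize_entity entity
  let normalized_text := PySem.Str.lower text
  if PySem.Str.isIn normalized_entity normalized_text then true
  else
    let part1 :=
      if pvVariations.contains normalized_entity then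
        match pvVariations.get? normalized_entity with
        | some full_forms => full_forms.any (fun v => PySem.Str.isIn v normalized_text)
        | none => false
      else false
    if part1 then true
    else
      pvVariations.items.any (fun p =>
        p.2.contains normalized_entity && PySem.Str.isIn p.1 normalized_text)

-- ===== PORT B =====
def pvLookup : PySem.Dict String (List String) :=
  pvVariations.items.foldl (fun d p =>
    let d1 := d.insert p.1 (d.getD p.1 [] ++ p.2)
    p.2.foldl (fun d2 f => d2.insert f (d2.getD f [] ++ [p.1])) d1)
    PySem.Dict.empty

def find_entity_in_text_alt (entity : String) (text : String) : Bool :=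
  let e := PySem.Str.strip (PySem.Str.lower entity)
  let t := PySem.Str.lower text
  PySem.Str.isIn e t || (pvLookup.getD e []).any (fun alt => PySem.Str.isIn alt t)

-- ===== PRECONDITION & SPEC =====
def Spec_find_entity_in_text (entity : String) (text : String) (out : Bool) : Prop := out = find_entity_in_text_alt entity text
instance (entity : String) (text : String) (out : Bool) : Decidable (Spec_find_entity_in_text entity text out) := by unfold Spec_find_entity_in_text; infer_instance

-- ===== CLAIM (what is proved, stated in full; the proofs are below) =====
def Claim_equal_find_entity_in_text : Prop := ∀ (entity : String) (text : String), Dom_find_entity_in_text entity text → Spec_find_entity_in_text entity text (find_entity_in_text entity text)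

-- ===== LEMMAS AND PROOFS =====
lemma pvLookup_eq : pvLookup = PySem.Dict.mk [
  ("nhai", ["national highways authority", "highways authority of india"]),
  ("national highways authority", ["nhai"]),
  ("highways authority of india", ["nhai"]),
  ("pmjay", ["pradhan mantri jan arogya", "ayushman bharat", "jan arogya yojana", "ab-pmjay"]),
  ("pradhan mantri jan arogya", ["pmjay"]),
  ("ayushman bharat", ["pmjay"]),
  ("jan arogya yojana", ["pmjay"]),
  ("ab-pmjay", ["pmjay"]),
  ("cbdt", ["central board of direct taxes"]),
  ("central board of direct taxes", ["cbdt"]),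
  ("fci", ["food corporation of india", "food corporation"]),
  ("food corporation of india", ["fci"]),
  ("food corporation", ["fci"]),
  ("cpse", ["central public sector enterprise", "public sector enterprise", "cpses"]),
  ("central public sector enterprise", ["cpse"]),
  ("public sector enterprise", ["cpse"]),
  ("cpses", ["cpse"]),
  ("sebi", ["securities and exchange board"]),
  ("securities and exchange board", ["sebi"]),
  ("frbm", ["fiscal responsibility", "budget management"]),
  ("fiscal responsibility", ["frbm"]),
  ("budget management", ["frbm"]),
  ("sha", ["state health agency", "state health agencies"]),
  ("state health agency", ["sha"]),
  ("state health agencies", ["sha"]),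
  ("nha", ["national health authority"]),
  ("national health authority", ["nha"]),
  ("tms", ["transaction management system"]),
  ("transaction management system", ["tms"]),
  ("cwc", ["central warehousing corporation"]),
  ("central warehousing corporation", ["cwc"]),
  ("swc", ["state warehousing corporation"]),
  ("state warehousing corporation", ["swc"]),
  ("peg", ["private entrepreneurs guarantee", "guarantee scheme"]),
  ("private entrepreneurs guarantee", ["peg"]),
  ("guarantee scheme", ["peg"]),
  ("cap", ["covered and plinth", "cover and plinth"]),
  ("covered and plinth", ["cap"]),
  ("cover and plinth", ["cap"]),
  ("fsd", ["food storage depot"]),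
  ("food storage depot", ["fsd"]),
  ("itd", ["income tax department"]),
  ("income tax department", ["itd"]),
  ("gst", ["goods and services tax"]),
  ("goods and services tax", ["gst"]),
  ("cgst", ["central gst"]),
  ("central gst", ["cgst"]),
  ("igst", ["integrated gst"]),
  ("integrated gst", ["igst"])] := by decide

lemma pv_core (e t : String) :
    (if PySem.Str.isIn e t then true
     else
       if (if pvVariations.contains e then
             match pvVariations.get? e with
             | some full_forms => full_forms.any (fun v => PySem.Str.isIn v t)
             | none => false
           else false) then true
       else pvVariations.items.any (fun p => p.2.contains e && PySem.Str.isIn p.1 t))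
    = (PySem.Str.isIn e t || (pvLookup.getD e []).any (fun alt => PySem.Str.isIn alt t)) := by
  by_cases h0 : "nhai" = e
  · subst h0
    rw [show pvVariations.contains "nhai" = true from by decide,
        show pvVariations.get? "nhai" = some ["national highways authority", "highways authority of india"] from by decide,
        show pvLookup.getD "nhai" [] = ["national highways authority", "highways authority of india"] from by rw [pvLookup_eq]; decide]
    simp [pvVariations]
  by_cases h1 : "national highways authority" = e
  · subst h1
    rw [show pvVariations.contains "national highways authority" = false from by decide,
        show pvLookup.getD "national highways authority" [] = ["nhai"] from by rw [pvLookup_eq]; decide]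
    simp [pvVariations]
  by_cases h2 : "highways authority of india" = e
  · subst h2
    rw [show pvVariations.contains "highways authority of india" = false from by decide,
        show pvLookup.getD "highways authority of india" [] = ["nhai"] from by rw [pvLookup_eq]; decide]
    simp [pvVariations]
  by_cases h3 : "pmjay" = e
  · subst h3
    rw [show pvVariations.contains "pmjay" = true from by decide,
        show pvVariations.get? "pmjay" = some ["pradhan mantri jan arogya", "ayushman bharat", "jan arogya yojana", "ab-pmjay"] from by decide,
        show pvLookup.getD "pmjay" [] = ["pradhan mantri jan arogya", "ayushman bharat", "jan arogya yojana", "ab-pmjay"] from by rw [pvLookup_eq]; decide]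
    simp [pvVariations]
  by_cases h4 : "pradhan mantri jan arogya" = e
  · subst h4
    rw [show pvVariations.contains "pradhan mantri jan arogya" = false from by decide,
        show pvLookup.getD "pradhan mantri jan arogya" [] = ["pmjay"] from by rw [pvLookup_eq]; decide]
    simp [pvVariations]
  by_cases h5 : "ayushman bharat" = e
  · subst h5
    rw [show pvVariations.contains "ayushman bharat" = false from by decide,
        show pvLookup.getD "ayushman bharat" [] = ["pmjay"] from by rw [pvLookup_eq]; decide]
    simp [pvVariations]
  by_cases h6 : "jan arogya yojana" = e
  · subst h6
    rw [show pvVariations.contains "jan arogya yojana" = false from by decide,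
        show pvLookup.getD "jan arogya yojana" [] = ["pmjay"] from by rw [pvLookup_eq]; decide]
    simp [pvVariations]
  by_cases h7 : "ab-pmjay" = e
  · subst h7
    rw [show pvVariations.contains "ab-pmjay" = false from by decide,
        show pvLookup.getD "ab-pmjay" [] = ["pmjay"] from by rw [pvLookup_eq]; decide]
    simp [pvVariations]
  by_cases h8 : "cbdt" = e
  · subst h8
    rw [show pvVariations.contains "cbdt" = true from by decide,
        show pvVariations.get? "cbdt" = some ["central board of direct taxes"] from by decide,
        show pvLookup.getD "cbdt" [] = ["central board of direct taxes"] from by rw [pvLookup_eq]; decide]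
    simp [pvVariations]
  by_cases h9 : "central board of direct taxes" = e
  · subst h9
    rw [show pvVariations.contains "central board of direct taxes" = false from by decide,
        show pvLookup.getD "central board of direct taxes" [] = ["cbdt"] from by rw [pvLookup_eq]; decide]
    simp [pvVariations]
  by_cases h10 : "fci" = e
  · subst h10
    rw [show pvVariations.contains "fci" = true from by decide,
        show pvVariations.get? "fci" = some ["food corporation of india", "food corporation"] from by decide,
        show pvLookup.getD "fci" [] = ["food corporation of india", "food corporation"] from by rw [pvLookup_eq]; decide]
    simp [pvVariations]
  by_cases h11 : "food corporation of india" = e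
  · subst h11
    rw [show pvVariations.contains "food corporation of india" = false from by decide,
        show pvLookup.getD "food corporation of india" [] = ["fci"] from by rw [pvLookup_eq]; decide]
    simp [pvVariations]
  by_cases h12 : "food corporation" = e
  · subst h12
    rw [show pvVariations.contains "food corporation" = false from by decide,
        show pvLookup.getD "food corporation" [] = ["fci"] from by rw [pvLookup_eq]; decide]
    simp [pvVariations]
  by_cases h13 : "cpse" = e
  · subst h13
    rw [show pvVariations.contains "cpse" = true from by decide,
        show pvVariations.get? "cpse" = some ["central public sector enterprise", "public sector enterprise", "cpses"] from by decide,
        show pvLookup.getD "cpse" [] = ["central public sector enterprise", "public sector enterprise", "cpses"] from by rw [pvLookup_eq]; decide]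
    simp [pvVariations]
  by_cases h14 : "central public sector enterprise" = e
  · subst h14
    rw [show pvVariations.contains "central public sector enterprise" = false from by decide,
        show pvLookup.getD "central public sector enterprise" [] = ["cpse"] from by rw [pvLookup_eq]; decide]
    simp [pvVariations]
  by_cases h15 : "public sector enterprise" = e
  · subst h15
    rw [show pvVariations.contains "public sector enterprise" = false from by decide,
        show pvLookup.getD "public sector enterprise" [] = ["cpse"] from by rw [pvLookup_eq]; decide]
    simp [pvVariations]
  by_cases h16 : "cpses" = e
  · subst h16
    rw [show pvVariations.contains "cpses" = false from by decide,
        show pvLookup.getD "cpses" [] = ["cpse"] from by rw [pvLookup_eq]; decide]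
    simp [pvVariations]
  by_cases h17 : "sebi" = e
  · subst h17
    rw [show pvVariations.contains "sebi" = true from by decide,
        show pvVariations.get? "sebi" = some ["securities and exchange board"] from by decide,
        show pvLookup.getD "sebi" [] = ["securities and exchange board"] from by rw [pvLookup_eq]; decide]
    simp [pvVariations]
  by_cases h18 : "securities and exchange board" = e
  · subst h18
    rw [show pvVariations.contains "securities and exchange board" = false from by decide,
        show pvLookup.getD "securities and exchange board" [] = ["sebi"] from by rw [pvLookup_eq]; decide]
    simp [pvVariations]
  by_cases h19 : "frbm" = e
  · subst h19
    rw [show pvVariations.contains "frbm" = true from by decide,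
        show pvVariations.get? "frbm" = some ["fiscal responsibility", "budget management"] from by decide,
        show pvLookup.getD "frbm" [] = ["fiscal responsibility", "budget management"] from by rw [pvLookup_eq]; decide]
    simp [pvVariations]
  by_cases h20 : "fiscal responsibility" = e
  · subst h20
    rw [show pvVariations.contains "fiscal responsibility" = false from by decide,
        show pvLookup.getD "fiscal responsibility" [] = ["frbm"] from by rw [pvLookup_eq]; decide]
    simp [pvVariations]
  by_cases h21 : "budget management" = e
  · subst h21
    rw [show pvVariations.contains "budget management" = false from by decide,
        show pvLookup.getD "budget management" [] = ["frbm"] from by rw [pvLookup_eq]; decide]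
    simp [pvVariations]
  by_cases h22 : "sha" = e
  · subst h22
    rw [show pvVariations.contains "sha" = true from by decide,
        show pvVariations.get? "sha" = some ["state health agency", "state health agencies"] from by decide,
        show pvLookup.getD "sha" [] = ["state health agency", "state health agencies"] from by rw [pvLookup_eq]; decide]
    simp [pvVariations]
  by_cases h23 : "state health agency" = e
  · subst h23
    rw [show pvVariations.contains "state health agency" = false from by decide,
        show pvLookup.getD "state health agency" [] = ["sha"] from by rw [pvLookup_eq]; decide]
    simp [pvVariations]
  by_cases h24 : "state health agencies" = e
  · subst h24
    rw [show pvVariations.contains "state health agencies" = false from by decide,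
        show pvLookup.getD "state health agencies" [] = ["sha"] from by rw [pvLookup_eq]; decide]
    simp [pvVariations]
  by_cases h25 : "nha" = e
  · subst h25
    rw [show pvVariations.contains "nha" = true from by decide,
        show pvVariations.get? "nha" = some ["national health authority"] from by decide,
        show pvLookup.getD "nha" [] = ["national health authority"] from by rw [pvLookup_eq]; decide]
    simp [pvVariations]
  by_cases h26 : "national health authority" = e
  · subst h26
    rw [show pvVariations.contains "national health authority" = false from by decide,
        show pvLookup.getD "national health authority" [] = ["nha"] from by rw [pvLookup_eq]; decide]
    simp [pvVariations]
  by_cases h27 : "tms" = e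
  · subst h27
    rw [show pvVariations.contains "tms" = true from by decide,
        show pvVariations.get? "tms" = some ["transaction management system"] from by decide,
        show pvLookup.getD "tms" [] = ["transaction management system"] from by rw [pvLookup_eq]; decide]
    simp [pvVariations]
  by_cases h28 : "transaction management system" = e
  · subst h28
    rw [show pvVariations.contains "transaction management system" = false from by decide,
        show pvLookup.getD "transaction management system" [] = ["tms"] from by rw [pvLookup_eq]; decide]
    simp [pvVariations]
  by_cases h29 : "cwc" = e
  · subst h29
    rw [show pvVariations.contains "cwc" = true from by decide,
        show pvVariations.get? "cwc" = some ["central warehousing corporation"] from by decide,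
        show pvLookup.getD "cwc" [] = ["central warehousing corporation"] from by rw [pvLookup_eq]; decide]
    simp [pvVariations]
  by_cases h30 : "central warehousing corporation" = e
  · subst h30
    rw [show pvVariations.contains "central warehousing corporation" = false from by decide,
        show pvLookup.getD "central warehousing corporation" [] = ["cwc"] from by rw [pvLookup_eq]; decide]
    simp [pvVariations]
  by_cases h31 : "swc" = e
  · subst h31
    rw [show pvVariations.contains "swc" = true from by decide,
        show pvVariations.get? "swc" = some ["state warehousing corporation"] from by decide,
        show pvLookup.getD "swc" [] = ["state warehousing corporation"] from by rw [pvLookup_eq]; decide]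
    simp [pvVariations]
  by_cases h32 : "state warehousing corporation" = e
  · subst h32
    rw [show pvVariations.contains "state warehousing corporation" = false from by decide,
        show pvLookup.getD "state warehousing corporation" [] = ["swc"] from by rw [pvLookup_eq]; decide]
    simp [pvVariations]
  by_cases h33 : "peg" = e
  · subst h33
    rw [show pvVariations.contains "peg" = true from by decide,
        show pvVariations.get? "peg" = some ["private entrepreneurs guarantee", "guarantee scheme"] from by decide,
        show pvLookup.getD "peg" [] = ["private entrepreneurs guarantee", "guarantee scheme"] from by rw [pvLookup_eq]; decide]
    simp [pvVariations]
  by_cases h34 : "private entrepreneurs guarantee" = e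
  · subst h34
    rw [show pvVariations.contains "private entrepreneurs guarantee" = false from by decide,
        show pvLookup.getD "private entrepreneurs guarantee" [] = ["peg"] from by rw [pvLookup_eq]; decide]
    simp [pvVariations]
  by_cases h35 : "guarantee scheme" = e
  · subst h35
    rw [show pvVariations.contains "guarantee scheme" = false from by decide,
        show pvLookup.getD "guarantee scheme" [] = ["peg"] from by rw [pvLookup_eq]; decide]
    simp [pvVariations]
  by_cases h36 : "cap" = e
  · subst h36
    rw [show pvVariations.contains "cap" = true from by decide,
        show pvVariations.get? "cap" = some ["covered and plinth", "cover and plinth"] from by decide,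
        show pvLookup.getD "cap" [] = ["covered and plinth", "cover and plinth"] from by rw [pvLookup_eq]; decide]
    simp [pvVariations]
  by_cases h37 : "covered and plinth" = e
  · subst h37
    rw [show pvVariations.contains "covered and plinth" = false from by decide,
        show pvLookup.getD "covered and plinth" [] = ["cap"] from by rw [pvLookup_eq]; decide]
    simp [pvVariations]
  by_cases h38 : "cover and plinth" = e
  · subst h38
    rw [show pvVariations.contains "cover and plinth" = false from by decide,
        show pvLookup.getD "cover and plinth" [] = ["cap"] from by rw [pvLookup_eq]; decide]
    simp [pvVariations]
  by_cases h39 : "fsd" = e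
  · subst h39
    rw [show pvVariations.contains "fsd" = true from by decide,
        show pvVariations.get? "fsd" = some ["food storage depot"] from by decide,
        show pvLookup.getD "fsd" [] = ["food storage depot"] from by rw [pvLookup_eq]; decide]
    simp [pvVariations]
  by_cases h40 : "food storage depot" = e
  · subst h40
    rw [show pvVariations.contains "food storage depot" = false from by decide,
        show pvLookup.getD "food storage depot" [] = ["fsd"] from by rw [pvLookup_eq]; decide]
    simp [pvVariations]
  by_cases h41 : "itd" = e
  · subst h41
    rw [show pvVariations.contains "itd" = true from by decide,
        show pvVariations.get? "itd" = some ["income tax department"] from by decide,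
        show pvLookup.getD "itd" [] = ["income tax department"] from by rw [pvLookup_eq]; decide]
    simp [pvVariations]
  by_cases h42 : "income tax department" = e
  · subst h42
    rw [show pvVariations.contains "income tax department" = false from by decide,
        show pvLookup.getD "income tax department" [] = ["itd"] from by rw [pvLookup_eq]; decide]
    simp [pvVariations]
  by_cases h43 : "gst" = e
  · subst h43
    rw [show pvVariations.contains "gst" = true from by decide,
        show pvVariations.get? "gst" = some ["goods and services tax"] from by decide,
        show pvLookup.getD "gst" [] = ["goods and services tax"] from by rw [pvLookup_eq]; decide]
    simp [pvVariations]
  by_cases h44 : "goods and services tax" = e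
  · subst h44
    rw [show pvVariations.contains "goods and services tax" = false from by decide,
        show pvLookup.getD "goods and services tax" [] = ["gst"] from by rw [pvLookup_eq]; decide]
    simp [pvVariations]
  by_cases h45 : "cgst" = e
  · subst h45
    rw [show pvVariations.contains "cgst" = true from by decide,
        show pvVariations.get? "cgst" = some ["central gst"] from by decide,
        show pvLookup.getD "cgst" [] = ["central gst"] from by rw [pvLookup_eq]; decide]
    simp [pvVariations]
  by_cases h46 : "central gst" = e
  · subst h46
    rw [show pvVariations.contains "central gst" = false from by decide,
        show pvLookup.getD "central gst" [] = ["cgst"] from by rw [pvLookup_eq]; decide]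
    simp [pvVariations]
  by_cases h47 : "igst" = e
  · subst h47
    rw [show pvVariations.contains "igst" = true from by decide,
        show pvVariations.get? "igst" = some ["integrated gst"] from by decide,
        show pvLookup.getD "igst" [] = ["integrated gst"] from by rw [pvLookup_eq]; decide]
    simp [pvVariations]
  by_cases h48 : "integrated gst" = e
  · subst h48
    rw [show pvVariations.contains "integrated gst" = false from by decide,
        show pvLookup.getD "integrated gst" [] = ["igst"] from by rw [pvLookup_eq]; decide]
    simp [pvVariations]
  simp [pvVariations, pvLookup_eq, PySem.Dict.getD_eq_get?_getD, PySem.Dict.get?,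
        h0, h1, Ne.symm h1, h2, Ne.symm h2, h3, h4, Ne.symm h4, h5, Ne.symm h5, h6, Ne.symm h6, h7, Ne.symm h7, h8, h9, Ne.symm h9, h10, h11, Ne.symm h11, h12, Ne.symm h12, h13, h14, Ne.symm h14, h15, Ne.symm h15, h16, Ne.symm h16, h17, h18, Ne.symm h18, h19, h20, Ne.symm h20, h21, Ne.symm h21, h22, h23, Ne.symm h23, h24, Ne.symm h24, h25, h26, Ne.symm h26, h27, h28, Ne.symm h28, h29, h30, Ne.symm h30, h31, h32, Ne.symm h32, h33, h34, Ne.symm h34, h35, Ne.symm h35, h36, h37, Ne.symm h37, h38, Ne.symm h38, h39, h40, Ne.symm h40, h41, h42, Ne.symm h42, h43, h44, Ne.symm h44, h45, h46, Ne.symm h46, h47, h48, Ne.symm h48]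

-- ===== VERDICT (by name: the statement is the Claim_ definition above) =====
theorem find_entity_in_text_spec : Claim_equal_find_entity_in_text := by
  intro entity text _
  unfold Spec_find_entity_in_text
  simp only [find_entity_in_text, find_entity_in_text_alt, normalize_entity]
  exact pv_core (PySem.Str.strip (PySem.Str.lower entity)) (PySem.Str.lower text)
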